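-- pv_equiv track=rewrite | github.com/mp65537/AIIR-PROJ-2021-Server | src/rules.py | _re_sub_expr_to_text
-- ===== SOURCE A (Python) =====
-- def _re_sub_expr_to_text(input_string):
--     curr_offset = 0
--     result_string = ""
--     while True:
--         dollar_offset = input_string.find("$", curr_offset)
--         expr_offset = dollar_offset + 1
--         if (dollar_offset < 0) or (expr_offset >= len(input_string)):
--             break
--         if input_string[expr_offset] == "#":
--             result_string += input_string[curr_offset:dollar_offset]
--             result_string += "\\"
--             curr_offset = expr_offset + 1
--         else:
--             result_string += input_string[curr_offset:expr_offset]
--             curr_offset = expr_offset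
--             after_escaped_offset = curr_offset + 2
--             if (after_escaped_offset <= len(input_string)) and \
--                 (input_string[curr_offset:after_escaped_offset] == "$#"):
--                 result_string += "#"
--                 curr_offset = after_escaped_offset
--     result_string += input_string[curr_offset:]
--     return result_string
-- ===== SOURCE B (Python) =====
-- def _re_sub_expr_to_text(input_string):
--     # One-pass character tokenizer: consume '$$#' -> '$#', '$#' -> '\', else copy one char.
--     out = []
--     i = 0
--     n = len(input_string)
--     while i < n:
--         if input_string.startswith("$$#", i):
--             out.append("$#")
--             i += 3
--         elif input_string.startswith("$#", i):
--             out.append("\\")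
--             i += 2
--         else:
--             out.append(input_string[i])
--             i += 1
--     return "".join(out)
-- ===== Notes on version B (the rewrite author's own statement) =====
-- stated objective: simpler
-- what changed: A repeatedly calls str.find('$', offset) and pastes slices, with a two-stage re-check for the protected '$$#' sequence; B is a single left-to-right tokenizer that at each position consumes '$$#' -> '$#', '$#' -> '\', or copies one character.
import Mathlib
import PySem

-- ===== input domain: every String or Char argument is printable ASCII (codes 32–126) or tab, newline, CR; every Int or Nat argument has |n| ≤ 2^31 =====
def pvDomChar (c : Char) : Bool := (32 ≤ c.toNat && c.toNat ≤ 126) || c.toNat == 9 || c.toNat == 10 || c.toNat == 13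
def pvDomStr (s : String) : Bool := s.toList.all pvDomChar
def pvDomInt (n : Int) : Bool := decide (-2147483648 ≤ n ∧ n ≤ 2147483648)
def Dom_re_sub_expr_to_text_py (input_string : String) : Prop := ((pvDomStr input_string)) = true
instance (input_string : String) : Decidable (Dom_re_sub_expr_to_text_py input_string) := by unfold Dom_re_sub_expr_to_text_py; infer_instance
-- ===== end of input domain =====

-- B replaces A's find/slice chunk loop by a one-pass character tokenizer (consume '$$#' / '$#' / one char); objective: simpler.


-- ===== PORT A =====
-- A's while-loop, transliterated over the character list; `fuel` only makes the
-- recursion total (the loop strictly increases curr_offset, so fuel = length + 1 never runs out;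
-- the fuel-0 branch performs the same `break` action).
def reSubLoopA (s : List Char) : Nat → Nat → List Char → List Char
  | 0, curr, res => res ++ PySem.List.slice s (some (curr : Int)) none
  | fuel + 1, curr, res =>
    let dollar : Int := PySem.Chars.findFrom s ['$'] (curr : Int)
    let expr : Int := dollar + 1
    if dollar < 0 ∨ (s.length : Int) ≤ expr then
      res ++ PySem.List.slice s (some (curr : Int)) none
    else if PySem.List.pyGet? s expr = some '#' then
      reSubLoopA s fuel (expr + 1).toNat (res ++ PySem.List.slice s (some (curr : Int)) (some dollar) ++ ['\\'])
    else
      let res' := res ++ PySem.List.slice s (some (curr : Int)) (some expr)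
      let curr' := expr.toNat
      let after : Int := (curr' : Int) + 2
      if after ≤ (s.length : Int) ∧ PySem.List.slice s (some (curr' : Int)) (some after) = ['$', '#'] then
        reSubLoopA s fuel after.toNat (res' ++ ['#'])
      else
        reSubLoopA s fuel curr' res'

def re_sub_expr_to_text_py (input_string : String) : String :=
  String.ofList (reSubLoopA input_string.toList (input_string.toList.length + 1) 0 [])

-- ===== PORT B =====
-- Source B's while-loop: each iteration consumes the token starting at i ('$$#', '$#', or one char).
def reSubScanB : List Char → List Char
  | [] => []
  | c :: rest =>
    if PySem.Chars.startswith (c :: rest) ['$', '$', '#'] then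
      '$' :: '#' :: reSubScanB (rest.drop 2)
    else if PySem.Chars.startswith (c :: rest) ['$', '#'] then
      '\\' :: reSubScanB (rest.drop 1)
    else
      c :: reSubScanB rest
termination_by l => l.length
decreasing_by
  all_goals simp [List.length_drop]

def re_sub_expr_to_text_py_alt (input_string : String) : String :=
  String.ofList (reSubScanB input_string.toList)

-- ===== PRECONDITION & SPEC =====
def Spec_re_sub_expr_to_text_py (input_string : String) (out : String) : Prop := out = re_sub_expr_to_text_py_alt input_string
instance (input_string : String) (out : String) : Decidable (Spec_re_sub_expr_to_text_py input_string out) := by unfold Spec_re_sub_expr_to_text_py; infer_instance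

-- ===== CLAIM (what is proved, stated in full; the proofs are below) =====
def Claim_equal_re_sub_expr_to_text_py : Prop := ∀ (input_string : String), Dom_re_sub_expr_to_text_py input_string → Spec_re_sub_expr_to_text_py input_string (re_sub_expr_to_text_py input_string)

-- ===== LEMMAS AND PROOFS =====

lemma startswith_two_iff (c : Char) (rest : List Char) (p q : Char) :
    PySem.Chars.startswith (c :: rest) [p, q] = true ↔ c = p ∧ ∃ r, rest = q :: r := by
  rw [PySem.Chars.startswith_iff]
  constructor
  · rintro ⟨r, hr⟩
    have hr' : p :: q :: r = c :: rest := by simpa using hr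
    obtain ⟨h1, h2⟩ := List.cons_eq_cons.mp hr'
    exact ⟨h1.symm, r, h2.symm⟩
  · rintro ⟨hc, r, hr⟩
    exact ⟨r, by simp [hc, hr]⟩

lemma startswith_three_iff (c : Char) (rest : List Char) (p q w : Char) :
    PySem.Chars.startswith (c :: rest) [p, q, w] = true ↔ c = p ∧ ∃ r, rest = q :: w :: r := by
  rw [PySem.Chars.startswith_iff]
  constructor
  · rintro ⟨r, hr⟩
    have hr' : p :: q :: w :: r = c :: rest := by simpa using hr
    obtain ⟨h1, h2⟩ := List.cons_eq_cons.mp hr'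
    exact ⟨h1.symm, r, h2.symm⟩
  · rintro ⟨hc, r, hr⟩
    exact ⟨r, by simp [hc, hr]⟩

-- scanB on a head that is not '$' copies it.
lemma reSubScanB_cons_ne (c : Char) (rest : List Char) (hc : c ≠ '$') :
    reSubScanB (c :: rest) = c :: reSubScanB rest := by
  rw [reSubScanB, if_neg, if_neg]
  · intro h; exact hc ((startswith_two_iff _ _ _ _).mp h).1
  · intro h; exact hc ((startswith_three_iff _ _ _ _ _).mp h).1

lemma reSubScanB_copy (u v : List Char) (hu : '$' ∉ u) :
    reSubScanB (u ++ v) = u ++ reSubScanB v := by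
  induction u with
  | nil => rfl
  | cons c u ih =>
    have hc : c ≠ '$' := fun h => hu (h ▸ List.mem_cons_self)
    rw [List.cons_append, reSubScanB_cons_ne c _ hc, ih (fun h => hu (List.mem_cons_of_mem _ h))]
    simp

lemma reSubScanB_no_dollar (u : List Char) (hu : '$' ∉ u) : reSubScanB u = u := by
  calc reSubScanB u = reSubScanB (u ++ []) := by simp
    _ = u ++ reSubScanB [] := reSubScanB_copy u [] hu
    _ = u := by rw [reSubScanB]; simp

-- One `scanB` step on a suffix that starts with '$'.
lemma reSubScanB_dollar_hash (r : List Char) :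
    reSubScanB ('$' :: '#' :: r) = '\\' :: reSubScanB r := by
  have h3 : ¬ PySem.Chars.startswith ('$' :: '#' :: r) ['$', '$', '#'] = true := by
    intro h; obtain ⟨-, r', hr⟩ := (startswith_three_iff _ _ _ _ _).mp h; simp at hr
  have h2 : PySem.Chars.startswith ('$' :: '#' :: r) ['$', '#'] = true :=
    (startswith_two_iff _ _ _ _).mpr ⟨rfl, r, rfl⟩
  rw [reSubScanB, if_neg h3, if_pos h2]
  simp

lemma reSubScanB_dollar_dollar_hash (r : List Char) :
    reSubScanB ('$' :: '$' :: '#' :: r) = '$' :: '#' :: reSubScanB r := by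
  have h3 : PySem.Chars.startswith ('$' :: '$' :: '#' :: r) ['$', '$', '#'] = true :=
    (startswith_three_iff _ _ _ _ _).mpr ⟨rfl, r, rfl⟩
  rw [reSubScanB, if_pos h3]
  simp

lemma reSubScanB_dollar_other (c : Char) (r : List Char) (hc : c ≠ '#')
    (hne : ¬(c = '$' ∧ ∃ r2, r = '#' :: r2)) :
    reSubScanB ('$' :: c :: r) = '$' :: reSubScanB (c :: r) := by
  have h3 : ¬ PySem.Chars.startswith ('$' :: c :: r) ['$', '$', '#'] = true := by
    intro h
    obtain ⟨-, r', hr⟩ := (startswith_three_iff _ _ _ _ _).mp h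
    obtain ⟨h1, h2⟩ := List.cons_eq_cons.mp hr
    exact hne ⟨h1, r', h2⟩
  have h2 : ¬ PySem.Chars.startswith ('$' :: c :: r) ['$', '#'] = true := by
    intro h
    obtain ⟨-, r', hr⟩ := (startswith_two_iff _ _ _ _).mp h
    exact hc (List.cons_eq_cons.mp hr).1
  rw [reSubScanB, if_neg h3, if_neg h2]

-- The no-'$' prefix of the suffix before the first match.
lemma take_find_no_dollar (t : List Char) (h : 0 ≤ PySem.Chars.find t ['$']) :
    '$' ∉ t.take (PySem.Chars.find t ['$']).toNat := by
  intro hmem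
  obtain ⟨i, hi, hval⟩ := List.getElem_of_mem hmem
  have hlt : i < (PySem.Chars.find t ['$']).toNat := by
    simp [List.length_take] at hi; omega
  have hit : i < t.length := by simp [List.length_take] at hi; omega
  have hval' : t[i] = '$' := by rw [List.getElem_take] at hval; exact hval
  exact (PySem.Chars.find_spec h).2 i hlt
    ⟨t.drop (i + 1), by simp [List.drop_eq_getElem_cons hit, hval']⟩

lemma reSubScanB_single_dollar : reSubScanB ['$'] = ['$'] := by
  rw [reSubScanB, if_neg (by decide), if_neg (by decide), reSubScanB]

-- Main loop invariant: A's loop from curr with accumulator res computes res ++ scanB (drop curr).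
lemma reSubLoopA_eq (l : List Char) :
    ∀ fuel curr res, curr ≤ l.length → l.length - curr < fuel →
      reSubLoopA l fuel curr res = res ++ reSubScanB (l.drop curr) := by
  intro fuel
  induction fuel with
  | zero => intro curr res _ h; omega
  | succ fuel ih =>
    intro curr res hcurr hfuel
    rw [reSubLoopA, PySem.Chars.findFrom_natCast l ['$'] curr hcurr]
    by_cases hf : PySem.Chars.find (l.drop curr) ['$'] = -1
    · rw [if_pos (by simp [hf]), PySem.List.slice_from_natCast]
      have hnd : '$' ∉ l.drop curr := fun hmem =>
        (PySem.Chars.find_eq_neg_one_iff _ ['$']).mp hf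
          ((List.singleton_infix_iff '$' _).mpr hmem)
      rw [reSubScanB_no_dollar _ hnd]
    · -- first '$' at offset f of the suffix, i.e. at position j = curr + f of l
      have hf0 : 0 ≤ PySem.Chars.find (l.drop curr) ['$'] := by
        have := PySem.Chars.neg_one_le_find (l.drop curr) ['$']; omega
      obtain ⟨f, hfI⟩ : ∃ f : Nat, PySem.Chars.find (l.drop curr) ['$'] = (f : Int) :=
        ⟨_, (Int.toNat_of_nonneg hf0).symm⟩
      have hpre := PySem.Chars.find_spec (sub := ['$']) hf0
      rw [hfI] at hpre
      simp only [Int.toNat_natCast] at hpre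
      obtain ⟨v, hv⟩ := hpre.1
      have hu : '$' ∉ (l.drop curr).take f := by
        have := take_find_no_dollar (l.drop curr) hf0
        rw [hfI] at this
        simpa using this
      have hflen : f < (l.drop curr).length := by
        have h1 : ('$' :: v).length ≤ ((l.drop curr).drop f).length := by
          rw [← hv]; simp
        simp [List.length_drop] at h1 ⊢
        omega
      have htlen : (l.drop curr).length = l.length - curr := by simp
      have hjlen : curr + f < l.length := by omega
      have hdropj : l.drop (curr + f) = '$' :: v := by
        rw [← List.drop_drop (i := f) (j := curr)]
        exact hv.symm
      have htu : l.drop curr = (l.drop curr).take f ++ '$' :: v := by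
        conv_lhs => rw [← List.take_append_drop f (l.drop curr)]
        rw [← hv]
        simp
      rw [hfI]
      have hd : (if (f : Int) = -1 then (-1 : Int) else (curr : Int) + (f : Int))
          = ((curr + f : Nat) : Int) := by
        rw [if_neg (by omega)]; push_cast; ring
      rw [hd]
      by_cases hbreak : l.length ≤ curr + f + 1
      · -- the '$' is the last character: break, tail copied verbatim
        rw [if_pos (by right; push_cast; omega)]
        have hv_nil : v = [] := by
          apply List.eq_nil_of_length_eq_zero
          have h1 : ('$' :: v).length = (l.drop (curr + f)).length := by rw [hdropj]
          simp at h1; omega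
        have hscan : reSubScanB (l.drop curr) = (l.drop curr).take f ++ ['$'] := by
          conv_lhs => rw [htu, hv_nil]
          rw [reSubScanB_copy _ _ hu, reSubScanB_single_dollar]
        rw [PySem.List.slice_from_natCast, hscan]
        conv_lhs => rw [htu, hv_nil]
      · rw [Nat.not_le] at hbreak
        rw [if_neg (by push_cast; omega)]
        obtain ⟨c, r, hcr⟩ : ∃ c r, v = c :: r := by
          cases v with
          | nil =>
            exfalso
            have h1 : ('$' :: ([] : List Char)).length = (l.drop (curr + f)).length := by
              rw [hdropj]
            simp at h1; omega
          | cons c r => exact ⟨c, r, rfl⟩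
        have hdropj1 : l.drop (curr + f + 1) = c :: r := by
          rw [← List.drop_drop (i := 1) (j := curr + f), hdropj, hcr]
          rfl
        have hget : PySem.List.pyGet? l (((curr + f : Nat) : Int) + 1) = some c := by
          rw [show ((curr + f : Nat) : Int) + 1 = ((curr + f + 1 : Nat) : Int) by push_cast; ring,
            PySem.List.pyGet?_natCast]
          have h1 := congrArg (fun x => x[0]?) hdropj1
          simpa [List.getElem?_drop] using h1
        have hsliceu : PySem.List.slice l (some (curr : Int)) (some ((curr + f : Nat) : Int))
            = (l.drop curr).take f := by
          rw [PySem.List.slice_natCast]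
          congr 1
          omega
        by_cases hc : c = '#'
        · -- '$#' → '\'
          rw [if_pos (by rw [hget, hc])]
          rw [show (((curr + f : Nat) : Int) + 1 + 1).toNat = curr + f + 2 by omega]
          rw [hsliceu, ih (curr + f + 2) _ (by omega) (by omega)]
          have hdropj2 : l.drop (curr + f + 2) = r := by
            rw [show curr + f + 2 = curr + f + 1 + 1 from rfl,
              ← List.drop_drop (i := 1) (j := curr + f + 1), hdropj1]
            rfl
          have hscan : reSubScanB (l.drop curr)
              = (l.drop curr).take f ++ '\\' :: reSubScanB r := by
            conv_lhs => rw [htu, hcr, hc]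
            rw [reSubScanB_copy _ _ hu, reSubScanB_dollar_hash]
          rw [hdropj2, hscan]
          simp
        · -- lone '$' copied; maybe a protected '$$#' follows
          rw [if_neg (by rw [hget]; simp [hc])]
          rw [show (((curr + f : Nat) : Int) + 1).toNat = curr + f + 1 by omega]
          have hslicec : PySem.List.slice l (some (curr : Int)) (some (((curr + f : Nat) : Int) + 1))
              = (l.drop curr).take f ++ ['$'] := by
            rw [show ((curr + f : Nat) : Int) + 1 = ((curr + f + 1 : Nat) : Int) by push_cast; ring,
              PySem.List.slice_natCast]
            rw [show curr + f + 1 - curr = f + 1 by omega]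
            have hlt : ((l.drop curr).take f).length = f := by
              simp [List.length_take]; omega
            conv_lhs => rw [htu]
            rw [show f + 1 = ((l.drop curr).take f).length + 1 by rw [hlt]]
            rw [List.take_append]
            simp
          rw [hslicec]
          have hslice2 : PySem.List.slice l (some ((curr + f + 1 : Nat) : Int))
              (some (((curr + f + 1 : Nat) : Int) + 2)) = (c :: r).take 2 := by
            rw [show ((curr + f + 1 : Nat) : Int) + 2 = ((curr + f + 3 : Nat) : Int) by push_cast; ring,
              PySem.List.slice_natCast, hdropj1]
            congr 1
            omega
          by_cases hprot : c = '$' ∧ ∃ r2, r = '#' :: r2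
          · obtain ⟨hcd, r2, hr2⟩ := hprot
            have hlen3 : curr + f + 3 ≤ l.length := by
              have h1 : (c :: r).length ≤ (l.drop (curr + f + 1)).length := by rw [hdropj1]
              rw [hr2] at h1
              simp at h1
              omega
            rw [if_pos ⟨by push_cast; omega, by rw [hslice2, hcd, hr2]; rfl⟩]
            rw [show (((curr + f + 1 : Nat) : Int) + 2).toNat = curr + f + 3 by omega]
            rw [ih (curr + f + 3) _ (by omega) (by omega)]
            have hdropj3 : l.drop (curr + f + 3) = r2 := by
              rw [show curr + f + 3 = curr + f + 1 + 2 by omega,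
                ← List.drop_drop (i := 2) (j := curr + f + 1), hdropj1, hr2]
              rfl
            have hscan : reSubScanB (l.drop curr)
                = (l.drop curr).take f ++ '$' :: '#' :: reSubScanB r2 := by
              conv_lhs => rw [htu, hcr, hcd, hr2]
              rw [reSubScanB_copy _ _ hu, reSubScanB_dollar_dollar_hash]
            rw [hdropj3, hscan]
            simp
          · rw [if_neg ?_]
            · rw [ih (curr + f + 1) _ (by omega) (by omega)]
              have hscan : reSubScanB (l.drop curr)
                  = (l.drop curr).take f ++ '$' :: reSubScanB (c :: r) := by
                conv_lhs => rw [htu, hcr]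
                rw [reSubScanB_copy _ _ hu, reSubScanB_dollar_other c r hc hprot]
              rw [hdropj1, hscan]
              simp
            · rintro ⟨-, habs⟩
              rw [hslice2] at habs
              apply hprot
              cases r with
              | nil => simp at habs
              | cons d r' =>
                simp at habs
                exact ⟨habs.1, r', by rw [habs.2]⟩

-- ===== VERDICT (by name: the statement is the Claim_ definition above) =====
theorem re_sub_expr_to_text_py_spec : Claim_equal_re_sub_expr_to_text_py := by
  intro s _
  unfold Spec_re_sub_expr_to_text_py re_sub_expr_to_text_py re_sub_expr_to_text_py_alt
  congr 1
  rw [reSubLoopA_eq s.toList (s.toList.length + 1) 0 [] (by omega) (by omega)]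
  simp
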